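-- pv_equiv track=rewrite | github.com/15673770356/cs61a | week02/lab03/lab03/lab03.py | mario_number
-- ===== SOURCE A (Python) =====
-- def mario_number(level):
--     """Return the number of ways that Mario can perform a sequence of steps
--     or jumps to reach the end of the level without ever landing in a Piranha
--     plant. Assume that every level begins and ends with a space.
--
--     >>> mario_number(' P P ')   # jump, jump
--     1
--     >>> mario_number(' P P  ')   # jump, jump, step
--     1
--     >>> mario_number('  P P ')  # step, jump, jump
--     1
--     >>> mario_number('   P P ') # step, step, jump, jump or jump, jump, jump
--     2
--     >>> mario_number(' P PP ')  # Mario cannot jump two plants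
--     0
--     >>> mario_number('    ')    # step, jump ; jump, step ; step, step, step
--     3
--     >>> mario_number('    P    ')
--     9
--     >>> mario_number('   P    P P   P  P P    P     P ')
--     180
--     """
--     "*** YOUR CODE HERE ***"
-- # （向前移动一处）或跳跃（向前移动两处）。每个关卡都以一个空白区域（“ ”）开始，马里奥开始，并以一个空白区域（“ ”）结束，
--     # 知道道路的总长
--     if len(level) == 1 : # 也就是已经走完了，仅仅只是剩下了最前面固定的那一个
--         return 1
--     elif len(level) < 1:
--         return 0
--     # 初始化结果
--     ways = 0
--
--     # 如果下一步没有食人花，递归计算剩余路径的可能性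
--     if level[1] != 'P':
--         ways += mario_number(level[1:])
--
--     # 如果下两步没有食人花，递归计算剩余路径的可能性
--     if len(level) > 2 and level[2] != 'P':
--         ways += mario_number(level[2:])
--
--     return ways
-- ===== SOURCE B (Python) =====
-- def mario_number(level):
--     # Forward linear DP: a single left-to-right pass. r[i] = number of ways
--     # to reach position i from the start; r[i] = 0 if level[i] == 'P',
--     # else r[i-1] + r[i-2]. Answer is r[n-1]. O(n) time, O(1) space.
--     if not level:
--         return 0
--     prev, cur = 0, 1  # ways to reach position -1 (none) and position 0 (start)
--     for ch in level[1:]: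
--         prev, cur = cur, (0 if ch == 'P' else cur + prev)
--     return cur
-- ===== Notes on version B (the rewrite author's own statement) =====
-- stated objective: faster
-- what changed: Replaced A's exponential backward recursion over string suffixes with a single forward left-to-right fold carrying only (ways to previous position, ways to current position).
import Mathlib
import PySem

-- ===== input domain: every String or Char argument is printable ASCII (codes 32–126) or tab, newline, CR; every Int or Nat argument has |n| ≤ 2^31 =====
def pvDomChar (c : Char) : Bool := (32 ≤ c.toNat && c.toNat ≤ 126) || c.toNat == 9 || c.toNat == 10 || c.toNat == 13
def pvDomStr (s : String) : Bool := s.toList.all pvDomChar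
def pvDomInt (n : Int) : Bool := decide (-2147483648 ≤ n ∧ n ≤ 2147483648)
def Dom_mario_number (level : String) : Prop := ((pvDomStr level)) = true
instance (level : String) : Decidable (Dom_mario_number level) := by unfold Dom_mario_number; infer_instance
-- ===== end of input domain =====

-- B replaces A's exponential backward suffix recursion by one forward left-to-right fold
-- with two accumulators; intended as faster (asymptotic).

-- ===== PORT A =====
-- A's recursion on the string's suffixes; slicing level[1:] / level[2:] becomes taking tails.
def marioRecA : List Char → Int
  | [] => 0
  | [_] => 1
  | _ :: b :: rest =>
    (if b ≠ 'P' then marioRecA (b :: rest) else 0) +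
    (match rest with
     | c :: _ => if c ≠ 'P' then marioRecA rest else 0
     | [] => 0)

def mario_number (level : String) : Int := marioRecA level.toList

-- ===== PORT B =====
-- B's forward loop: a fold over the characters after position 0, state
-- (prev, cur) = (ways to reach position i-1, ways to reach position i).
def marioStepB (s : Int × Int) (ch : Char) : Int × Int :=
  (s.2, if ch = 'P' then 0 else s.2 + s.1)

def mario_number_alt (level : String) : Int :=
  match level.toList with
  | [] => 0
  | _ :: rest => (rest.foldl marioStepB (0, 1)).2

-- ===== PRECONDITION & SPEC =====
def Spec_mario_number (level : String) (out : Int) : Prop := out = mario_number_alt level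
instance (level : String) (out : Int) : Decidable (Spec_mario_number level out) := by unfold Spec_mario_number; infer_instance

-- ===== CLAIM =====
def Claim_equal_mario_number : Prop := ∀ (level : String), Dom_mario_number level → Spec_mario_number level (mario_number level)

-- ===== LEMMAS AND PROOFS =====
-- marioRecA never looks at the head character.
theorem marioRecA_head (c : Char) (t : List Char) :
    marioRecA (c :: t) = marioRecA (' ' :: t) := by
  cases t <;> rfl

-- Jump-over contribution: ways from position i-1 jumping directly onto rest.head.
def marioJump : List Char → Int
  | [] => 0
  | c :: t => if c ≠ 'P' then marioRecA (c :: t) else 0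

-- Forward/backward duality: the fold from state (p2, p1) over the remaining tape
-- counts p1 · (ways from the current cell) + p2 · (ways jumping over it).
theorem foldl_marioStep (rest : List Char) :
    ∀ p2 p1 : Int, (rest.foldl marioStepB (p2, p1)).2
      = p1 * marioRecA (' ' :: rest) + p2 * marioJump rest := by
  induction rest with
  | nil => intro p2 p1; simp [marioRecA, marioJump]
  | cons c t ih =>
    intro p2 p1
    have h1 : marioRecA (' ' :: c :: t)
        = (if c ≠ 'P' then marioRecA (' ' :: t) else 0) + marioJump t := by
      simp only [marioRecA, marioJump, marioRecA_head c t]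
      cases t <;> simp [marioRecA, marioJump]
    have h2 : marioJump (c :: t) = if c ≠ 'P' then marioRecA (' ' :: t) else 0 := by
      simp only [marioJump, marioRecA_head c t]
    simp only [List.foldl_cons, marioStepB, ih, h1, h2]
    by_cases hc : c = 'P' <;> simp [hc] <;> ring

-- ===== VERDICT =====
theorem mario_number_spec : Claim_equal_mario_number := by
  intro level _
  unfold Spec_mario_number mario_number mario_number_alt
  cases h : level.toList with
  | nil => simp [marioRecA]
  | cons a rest =>
    show marioRecA (a :: rest) = (rest.foldl marioStepB (0, 1)).2
    rw [foldl_marioStep rest 0 1, marioRecA_head a rest]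
    ring
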